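-- pv_equiv track=rewrite | github.com/K0DA-PARALLAXStudio/TensorSort_Model_Installer-Comfyui | _Module/modul1_mainmodels.py | analyze_keys
-- ===== SOURCE A (Python) =====
-- def analyze_keys(keys):
--     """Analysiert Keys für UNET/CLIP/VAE/WAN/Z-Image/Qwen-Edit/Lotus Detection"""
--
--     unet_patterns = [
--         "model.diffusion_model", "down_blocks", "up_blocks", "mid_block",
--         "double_blocks", "single_blocks", "input_blocks", "output_blocks",
--         "middle_block"
--     ]
--
--     clip_patterns = [
--         "cond_stage_model", "text_model",
--         "clip_l", "clip_g", "conditioner.embedders"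
--     ]
--
--     # Z-Image specific: Qwen3 Text Encoder (NICHT CLIP!)
--     # Pattern: text_encoders.qwen3_4b.* → NICHT als CLIP zählen!
--     qwen_patterns = ["text_encoders.qwen", "qwen3_4b"]
--
--     vae_patterns = [
--         "first_stage_model", "decoder.conv_in", "encoder.conv_in", "vae"
--     ]
--
--     # WAN Video Model patterns (blocks.N.cross_attn)
--     # WAN hat "blocks.0.cross_attn" OHNE "double_blocks" oder "single_blocks"
--     has_wan = any("blocks." in k and "cross_attn" in k for k in keys)
--     has_flux_blocks = any("double_blocks" in k or "single_blocks" in k for k in keys)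
--
--     # WAN = hat blocks.*.cross_attn aber NICHT Flux-style blocks
--     is_wan = has_wan and not has_flux_blocks
--
--     # Z-Image Detection (NextDiT Architektur)
--     # Unique Keys: context_refiner, noise_refiner, cap_embedder
--     is_zimage = any("context_refiner" in k or "noise_refiner" in k or "cap_embedder" in k for k in keys)
--
--     # Qwen-Image-Edit Detection
--     # Unique Key: model.diffusion_model.txt_in (hat auch img_in)
--     is_qwen_edit = any("model.diffusion_model.txt_in" in k for k in keys)
--
--     # Lotus-Depth Detection
--     # Unique Keys: class_embedding + down_blocks.*.attentions (UNet-style aber für Depth)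
--     has_class_embedding = any("class_embedding" in k for k in keys)
--     has_down_attentions = any("down_blocks." in k and ".attentions." in k for k in keys)
--     is_lotus = has_class_embedding and has_down_attentions
--
--     has_unet = any(any(p in k for p in unet_patterns) for k in keys)
--
--     # WAN, Z-Image, Qwen-Edit, Lotus zählen auch als "hat UNET" für is_main_model()
--     if is_wan or is_zimage or is_qwen_edit or is_lotus:
--         has_unet = True
--
--     # CLIP Detection: NUR wenn NICHT Qwen3!
--     has_qwen = any(any(p in k for p in qwen_patterns) for k in keys)
--     if has_qwen:
--         # Z-Image hat Qwen3 statt CLIP!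
--         has_clip = False
--     else:
--         # Standard CLIP detection (inkl. text_encoder Pattern)
--         has_clip = any(any(p in k for p in clip_patterns) for k in keys)
--         # Legacy: auch text_encoder (aber nur wenn NICHT Qwen!)
--         if not has_clip:
--             has_clip = any("text_encoder" in k for k in keys)
--
--     has_vae = any(any(p in k for p in vae_patterns) for k in keys)
--
--     return has_unet, has_clip, has_vae
-- ===== SOURCE B (Python) =====
-- def analyze_keys(keys):
--     """Single-pass variant: one loop over keys accumulating all detection flags."""
--     unet_patterns = [
--         "model.diffusion_model", "down_blocks", "up_blocks", "mid_block",
--         "double_blocks", "single_blocks", "input_blocks", "output_blocks",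
--         "middle_block"
--     ]
--     clip_patterns = [
--         "cond_stage_model", "text_model",
--         "clip_l", "clip_g", "conditioner.embedders"
--     ]
--     qwen_patterns = ["text_encoders.qwen", "qwen3_4b"]
--     vae_patterns = [
--         "first_stage_model", "decoder.conv_in", "encoder.conv_in", "vae"
--     ]
--
--     has_wan = has_flux_blocks = is_zimage = is_qwen_edit = False
--     has_class_embedding = has_down_attentions = False
--     has_unet = has_qwen = clip_pat = text_enc = has_vae = False
--
--     for k in keys:
--         if "blocks." in k and "cross_attn" in k:
--             has_wan = True
--         if "double_blocks" in k or "single_blocks" in k: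
--             has_flux_blocks = True
--         if "context_refiner" in k or "noise_refiner" in k or "cap_embedder" in k:
--             is_zimage = True
--         if "model.diffusion_model.txt_in" in k:
--             is_qwen_edit = True
--         if "class_embedding" in k:
--             has_class_embedding = True
--         if "down_blocks." in k and ".attentions." in k:
--             has_down_attentions = True
--         if any(p in k for p in unet_patterns):
--             has_unet = True
--         if any(p in k for p in qwen_patterns):
--             has_qwen = True
--         if any(p in k for p in clip_patterns):
--             clip_pat = True
--         if "text_encoder" in k:
--             text_enc = True
--         if any(p in k for p in vae_patterns):
--             has_vae = True
--
--     is_wan = has_wan and not has_flux_blocks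
--     is_lotus = has_class_embedding and has_down_attentions
--     if is_wan or is_zimage or is_qwen_edit or is_lotus:
--         has_unet = True
--     if has_qwen:
--         has_clip = False
--     else:
--         has_clip = clip_pat or text_enc
--     return has_unet, has_clip, has_vae
-- ===== Notes on version B (the rewrite author's own statement) =====
-- stated objective: alternative
-- what changed: Replaced ~11 separate any(...) scans over keys with one fused loop that accumulates all boolean flags in a single pass, then applies the same combining logic.
import Mathlib
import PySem

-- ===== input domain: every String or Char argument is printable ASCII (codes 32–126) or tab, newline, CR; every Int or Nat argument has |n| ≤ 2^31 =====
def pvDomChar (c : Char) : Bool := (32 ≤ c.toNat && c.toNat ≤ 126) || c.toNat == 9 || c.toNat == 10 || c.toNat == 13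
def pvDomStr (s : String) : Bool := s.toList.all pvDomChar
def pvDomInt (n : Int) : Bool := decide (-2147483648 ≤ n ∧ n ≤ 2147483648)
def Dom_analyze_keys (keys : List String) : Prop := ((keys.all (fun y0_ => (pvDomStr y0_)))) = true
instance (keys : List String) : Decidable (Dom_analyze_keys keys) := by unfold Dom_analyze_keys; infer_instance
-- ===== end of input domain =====

-- B replaces A's ~11 separate any(...) scans by one fused loop accumulating all flags (objective: alternative; same combining logic afterwards).

-- ===== PORT A =====
def pvUnetPatterns : List String :=
  ["model.diffusion_model", "down_blocks", "up_blocks", "mid_block",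
   "double_blocks", "single_blocks", "input_blocks", "output_blocks",
   "middle_block"]

def pvClipPatterns : List String :=
  ["cond_stage_model", "text_model", "clip_l", "clip_g", "conditioner.embedders"]

def pvQwenPatterns : List String := ["text_encoders.qwen", "qwen3_4b"]

def pvVaePatterns : List String :=
  ["first_stage_model", "decoder.conv_in", "encoder.conv_in", "vae"]

def analyze_keys (keys : List String) : Bool × Bool × Bool :=
  let has_wan := keys.any (fun k => PySem.Str.isIn "blocks." k && PySem.Str.isIn "cross_attn" k)
  let has_flux_blocks := keys.any (fun k => PySem.Str.isIn "double_blocks" k || PySem.Str.isIn "single_blocks" k)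
  let is_wan := has_wan && !has_flux_blocks
  let is_zimage := keys.any (fun k => PySem.Str.isIn "context_refiner" k || PySem.Str.isIn "noise_refiner" k || PySem.Str.isIn "cap_embedder" k)
  let is_qwen_edit := keys.any (fun k => PySem.Str.isIn "model.diffusion_model.txt_in" k)
  let has_class_embedding := keys.any (fun k => PySem.Str.isIn "class_embedding" k)
  let has_down_attentions := keys.any (fun k => PySem.Str.isIn "down_blocks." k && PySem.Str.isIn ".attentions." k)
  let is_lotus := has_class_embedding && has_down_attentions
  let has_unet := keys.any (fun k => pvUnetPatterns.any (fun p => PySem.Str.isIn p k))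
  let has_unet := if is_wan || is_zimage || is_qwen_edit || is_lotus then true else has_unet
  let has_qwen := keys.any (fun k => pvQwenPatterns.any (fun p => PySem.Str.isIn p k))
  let has_clip :=
    if has_qwen then false
    else
      let has_clip := keys.any (fun k => pvClipPatterns.any (fun p => PySem.Str.isIn p k))
      if !has_clip then keys.any (fun k => PySem.Str.isIn "text_encoder" k) else has_clip
  let has_vae := keys.any (fun k => pvVaePatterns.any (fun p => PySem.Str.isIn p k))
  (has_unet, has_clip, has_vae)

-- ===== PORT B =====
structure PvFlags where
  wan : Bool
  flux : Bool
  zimage : Bool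
  qwenEdit : Bool
  classEmb : Bool
  downAtt : Bool
  unet : Bool
  qwen : Bool
  clipPat : Bool
  textEnc : Bool
  vae : Bool
deriving DecidableEq, Repr

def pvFlags0 : PvFlags := ⟨false, false, false, false, false, false, false, false, false, false, false⟩

-- the body of B's single loop: OR each substring test into its flag (Python: `if …: flag = True`)
def pvStep (f : PvFlags) (k : String) : PvFlags :=
  { wan      := if PySem.Str.isIn "blocks." k && PySem.Str.isIn "cross_attn" k then true else f.wan
    flux     := if PySem.Str.isIn "double_blocks" k || PySem.Str.isIn "single_blocks" k then true else f.flux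
    zimage   := if PySem.Str.isIn "context_refiner" k || PySem.Str.isIn "noise_refiner" k || PySem.Str.isIn "cap_embedder" k then true else f.zimage
    qwenEdit := if PySem.Str.isIn "model.diffusion_model.txt_in" k then true else f.qwenEdit
    classEmb := if PySem.Str.isIn "class_embedding" k then true else f.classEmb
    downAtt  := if PySem.Str.isIn "down_blocks." k && PySem.Str.isIn ".attentions." k then true else f.downAtt
    unet     := if pvUnetPatterns.any (fun p => PySem.Str.isIn p k) then true else f.unet
    qwen     := if pvQwenPatterns.any (fun p => PySem.Str.isIn p k) then true else f.qwen
    clipPat  := if pvClipPatterns.any (fun p => PySem.Str.isIn p k) then true else f.clipPat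
    textEnc  := if PySem.Str.isIn "text_encoder" k then true else f.textEnc
    vae      := if pvVaePatterns.any (fun p => PySem.Str.isIn p k) then true else f.vae }

def analyze_keys_alt (keys : List String) : Bool × Bool × Bool :=
  let f := keys.foldl pvStep pvFlags0
  let is_wan := f.wan && !f.flux
  let is_lotus := f.classEmb && f.downAtt
  let has_unet := if is_wan || f.zimage || f.qwenEdit || is_lotus then true else f.unet
  let has_clip := if f.qwen then false else f.clipPat || f.textEnc
  (has_unet, has_clip, f.vae)

-- ===== PRECONDITION & SPEC =====
def Spec_analyze_keys (keys : List String) (out : Bool × Bool × Bool) : Prop := out = analyze_keys_alt keys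
instance (keys : List String) (out : Bool × Bool × Bool) : Decidable (Spec_analyze_keys keys out) := by unfold Spec_analyze_keys; infer_instance

-- ===== CLAIM (what is proved, stated in full; the proofs are below) =====
def Claim_equal_analyze_keys : Prop := ∀ (keys : List String), Dom_analyze_keys keys → Spec_analyze_keys keys (analyze_keys keys)

-- ===== LEMMAS AND PROOFS =====

theorem pv_if_or (c b : Bool) : (if c = true then true else b) = (b || c) := by
  cases c <;> cases b <;> simp

-- the fused fold computes componentwise exactly the `any` scans A performs
theorem pv_fold_eq (keys : List String) (f : PvFlags) :
    keys.foldl pvStep f =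
      { wan      := f.wan || keys.any (fun k => PySem.Str.isIn "blocks." k && PySem.Str.isIn "cross_attn" k)
        flux     := f.flux || keys.any (fun k => PySem.Str.isIn "double_blocks" k || PySem.Str.isIn "single_blocks" k)
        zimage   := f.zimage || keys.any (fun k => PySem.Str.isIn "context_refiner" k || PySem.Str.isIn "noise_refiner" k || PySem.Str.isIn "cap_embedder" k)
        qwenEdit := f.qwenEdit || keys.any (fun k => PySem.Str.isIn "model.diffusion_model.txt_in" k)
        classEmb := f.classEmb || keys.any (fun k => PySem.Str.isIn "class_embedding" k)
        downAtt  := f.downAtt || keys.any (fun k => PySem.Str.isIn "down_blocks." k && PySem.Str.isIn ".attentions." k)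
        unet     := f.unet || keys.any (fun k => pvUnetPatterns.any (fun p => PySem.Str.isIn p k))
        qwen     := f.qwen || keys.any (fun k => pvQwenPatterns.any (fun p => PySem.Str.isIn p k))
        clipPat  := f.clipPat || keys.any (fun k => pvClipPatterns.any (fun p => PySem.Str.isIn p k))
        textEnc  := f.textEnc || keys.any (fun k => PySem.Str.isIn "text_encoder" k)
        vae      := f.vae || keys.any (fun k => pvVaePatterns.any (fun p => PySem.Str.isIn p k)) } := by
  induction keys generalizing f with
  | nil => simp
  | cons k ks ih =>
    simp only [List.foldl_cons, List.any_cons, ih, pvStep, pv_if_or, Bool.or_assoc]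

-- ===== VERDICT (by name: the statement is the Claim_ definition above) =====
theorem analyze_keys_spec : Claim_equal_analyze_keys := by
  intro keys _
  unfold Spec_analyze_keys analyze_keys analyze_keys_alt
  rw [pv_fold_eq]
  simp only [pvFlags0, Bool.false_or]
  cases h : keys.any (fun k => pvClipPatterns.any (fun p => PySem.Str.isIn p k)) <;> simp
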